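-- pv_equiv track=rewrite | github.com/uglybeauty4ever/stock-forecasting | dict.py | classify_and_score_words
-- ===== SOURCE A (Python) =====
-- def classify_and_score_words(word_list, sentiment_dict, negation_words, degree_dict):
--     sentiment_words = {}
--     negation_words_positions = {}
--     degree_words_positions = {}
--
--     for i, word in enumerate(word_list):
--         if word in sentiment_dict:
--             sentiment_words[i] = sentiment_dict[word]
--         elif word in negation_words:
--             negation_words_positions[i] = -1
--         elif word in degree_dict:
--             degree_words_positions[i] = degree_dict[word]
--
--     return calculate_weighted_score(sentiment_words, negation_words_positions, degree_words_positions, word_list)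
--
-- def calculate_weighted_score(sentiment_words, negation_words, degree_words, word_list):
--     W = 1
--     score = 0
--     sentiment_indices = list(sentiment_words.keys())
--
--     for i in range(len(word_list)):
--         if i in sentiment_words:
--             score += W * sentiment_words[i]
--             next_sentiment_index = sentiment_indices.index(i) + 1
--             if next_sentiment_index < len(sentiment_indices):
--                 for j in range(i + 1, sentiment_indices[next_sentiment_index]):
--                     if j in negation_words:
--                         W *= -1
--                     elif j in degree_words:
--                         W *= degree_words[j]
--
--     return score
-- ===== SOURCE B (Python) =====
-- def classify_and_score_words(word_list, sentiment_dict, negation_words, degree_dict):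
--     # One left-to-right pass: keep the current weight W, the modifier product
--     # accumulated since the last sentiment word, and whether a sentiment word
--     # has been seen yet (modifiers before the first sentiment word are inert).
--     W = 1
--     pending = 1
--     seen = False
--     score = 0
--     for word in word_list:
--         if word in sentiment_dict:
--             if seen:
--                 W *= pending
--             score += W * sentiment_dict[word]
--             pending = 1
--             seen = True
--         elif word in negation_words:
--             pending *= -1
--         elif word in degree_dict:
--             pending *= degree_dict[word]
--     return score
-- ===== Notes on version B (the rewrite author's own statement) =====
-- stated objective: faster
-- what changed: Replaces A's two-phase algorithm (build three position-indexed dicts, then loop over all indices with list.index rescans and an inner look-ahead loop over the gap to the next sentiment word) by a single left-to-right pass that keeps a running weight, a pending modifier product and a seen-sentiment flag.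
import Mathlib
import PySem

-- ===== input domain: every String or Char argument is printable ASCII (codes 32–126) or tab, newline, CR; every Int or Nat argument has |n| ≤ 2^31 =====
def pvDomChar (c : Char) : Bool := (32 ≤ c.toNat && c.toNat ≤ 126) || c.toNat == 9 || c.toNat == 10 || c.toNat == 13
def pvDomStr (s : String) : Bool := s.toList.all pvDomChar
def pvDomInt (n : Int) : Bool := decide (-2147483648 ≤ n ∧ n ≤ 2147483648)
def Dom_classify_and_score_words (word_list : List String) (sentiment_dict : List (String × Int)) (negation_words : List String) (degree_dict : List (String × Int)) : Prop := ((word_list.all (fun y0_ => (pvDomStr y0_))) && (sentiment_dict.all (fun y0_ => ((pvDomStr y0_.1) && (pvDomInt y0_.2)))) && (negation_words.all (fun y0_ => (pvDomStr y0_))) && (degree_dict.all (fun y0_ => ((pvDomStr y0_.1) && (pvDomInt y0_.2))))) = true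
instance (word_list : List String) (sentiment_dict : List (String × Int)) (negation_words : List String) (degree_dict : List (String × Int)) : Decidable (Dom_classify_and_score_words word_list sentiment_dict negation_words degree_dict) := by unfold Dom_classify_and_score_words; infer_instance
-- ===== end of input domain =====

-- B replaces A's position-dict construction plus its index-rescanning double loop by a single
-- left-to-right pass with a running weight and a pending-modifier product (same return value).

-- ===== PORT A =====
-- helper calculate_weighted_score, exactly as in A (dicts keyed by Int positions)
def calculate_weighted_score (sentiment_words negation_words degree_words : PySem.Dict Int Int)
    (word_list : List String) : Int :=
  -- W = 1; score = 0; sentiment_indices = list(sentiment_words.keys()); state st = (W, score)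
  let sentiment_indices := sentiment_words.keys
  ((PySem.List.pyRange 0 (PySem.List.len word_list) 1).foldl
    (fun (st : Int × Int) i =>
      if sentiment_words.contains i then
        -- score += W * sentiment_words[i]   (lookup cannot fail: i is a key of sentiment_words)
        let score := st.2 + st.1 * sentiment_words.getD i 0
        -- next_sentiment_index = sentiment_indices.index(i) + 1   (.index cannot fail: i is a key)
        let next_sentiment_index := (PySem.List.index? sentiment_indices i).getD 0 + 1
        if next_sentiment_index < sentiment_indices.length then
          ((PySem.List.pyRange (i + 1)
              (PySem.List.pyGetD sentiment_indices (next_sentiment_index : Int) 0) 1).foldl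
            (fun W j =>
              if negation_words.contains j then W * (-1)
              else if degree_words.contains j then W * degree_words.getD j 0
              else W) st.1, score)
        else (st.1, score)
      else st)
    (1, 0)).2

def classify_and_score_words (word_list : List String) (sentiment_dict : List (String × Int)) (negation_words : List String) (degree_dict : List (String × Int)) : Int :=
  let sd := PySem.Dict.ofList sentiment_dict
  let dd := PySem.Dict.ofList degree_dict
  -- st = (sentiment_words, negation_words_positions, degree_words_positions)
  let dicts := (PySem.List.enumerate word_list 0).foldl
    (fun (st : PySem.Dict Int Int × PySem.Dict Int Int × PySem.Dict Int Int) p =>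
      if sd.contains p.2 then (st.1.insert p.1 (sd.getD p.2 0), st.2.1, st.2.2)
      else if negation_words.contains p.2 then (st.1, st.2.1.insert p.1 (-1), st.2.2)
      else if dd.contains p.2 then (st.1, st.2.1, st.2.2.insert p.1 (dd.getD p.2 0))
      else st)
    (PySem.Dict.empty, PySem.Dict.empty, PySem.Dict.empty)
  calculate_weighted_score dicts.1 dicts.2.1 dicts.2.2 word_list

-- ===== PORT B =====
-- single pass; state st = (W, pending, seen, score)
def classify_and_score_words_alt (word_list : List String) (sentiment_dict : List (String × Int)) (negation_words : List String) (degree_dict : List (String × Int)) : Int :=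
  let sd := PySem.Dict.ofList sentiment_dict
  let dd := PySem.Dict.ofList degree_dict
  (word_list.foldl
    (fun (st : Int × Int × Bool × Int) word =>
      if sd.contains word then
        let W' := if st.2.2.1 then st.1 * st.2.1 else st.1
        (W', 1, true, st.2.2.2 + W' * sd.getD word 0)
      else if negation_words.contains word then (st.1, st.2.1 * (-1), st.2.2.1, st.2.2.2)
      else if dd.contains word then (st.1, st.2.1 * dd.getD word 0, st.2.2.1, st.2.2.2)
      else st)
    (1, 1, false, 0)).2.2.2

-- ===== PRECONDITION & SPEC =====
def Spec_classify_and_score_words (word_list : List String) (sentiment_dict : List (String × Int)) (negation_words : List String) (degree_dict : List (String × Int)) (out : Int) : Prop := out = classify_and_score_words_alt word_list sentiment_dict negation_words degree_dict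
instance (word_list : List String) (sentiment_dict : List (String × Int)) (negation_words : List String) (degree_dict : List (String × Int)) (out : Int) : Decidable (Spec_classify_and_score_words word_list sentiment_dict negation_words degree_dict out) := by unfold Spec_classify_and_score_words; infer_instance

-- ===== CLAIM (what is proved, stated in full; the proofs are below) =====
def Claim_equal_classify_and_score_words : Prop := ∀ (word_list : List String) (sentiment_dict : List (String × Int)) (negation_words : List String) (degree_dict : List (String × Int)), Dom_classify_and_score_words word_list sentiment_dict negation_words degree_dict → Spec_classify_and_score_words word_list sentiment_dict negation_words degree_dict (classify_and_score_words word_list sentiment_dict negation_words degree_dict)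

-- ===== LEMMAS AND PROOFS =====

-- the class of a word
inductive PvC where
  | sent : Int → PvC
  | neg : PvC
  | deg : Int → PvC
  | other : PvC
deriving DecidableEq, Repr

def pvCls (sd dd : PySem.Dict String Int) (nw : List String) (w : String) : PvC :=
  if sd.contains w then .sent (sd.getD w 0)
  else if nw.contains w then .neg
  else if dd.contains w then .deg (dd.getD w 0)
  else .other

def pvF_S : PvC → Option Int
  | .sent v => some v
  | _ => none

def pvF_N : PvC → Option Int
  | .neg => some (-1)
  | _ => none

def pvF_D : PvC → Option Int
  | .deg d => some d
  | _ => none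

-- the positions (starting at s) whose class is selected by f, with values
def pvPairsC (f : PvC → Option Int) : List PvC → Int → List (Int × Int)
  | [], _ => []
  | c :: t, s =>
    match f c with
    | some v => (s, v) :: pvPairsC f t (s + 1)
    | none => pvPairsC f t (s + 1)

-- the three position dicts A builds
def pvS (cs : List PvC) : PySem.Dict Int Int := ⟨pvPairsC pvF_S cs 0⟩
def pvN (cs : List PvC) : PySem.Dict Int Int := ⟨pvPairsC pvF_N cs 0⟩
def pvD (cs : List PvC) : PySem.Dict Int Int := ⟨pvPairsC pvF_D cs 0⟩

-- the loop bodies of the two ports, as named helpers (definitionally the ports' lambdas)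
def pvModStep (negation_words degree_words : PySem.Dict Int Int) (W : Int) (j : Int) : Int :=
  if negation_words.contains j then W * (-1)
  else if degree_words.contains j then W * degree_words.getD j 0
  else W

def pvOuterStep (S N D : PySem.Dict Int Int) (st : Int × Int) (i : Int) : Int × Int :=
  if S.contains i then
    if (PySem.List.index? S.keys i).getD 0 + 1 < S.keys.length then
      ((PySem.List.pyRange (i + 1)
          (PySem.List.pyGetD S.keys (((PySem.List.index? S.keys i).getD 0 + 1 : Nat) : Int) 0)
          1).foldl (pvModStep N D) st.1,
       st.2 + st.1 * S.getD i 0)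
    else (st.1, st.2 + st.1 * S.getD i 0)
  else st

def pvBuildStep (sd dd : PySem.Dict String Int) (nw : List String)
    (st : PySem.Dict Int Int × PySem.Dict Int Int × PySem.Dict Int Int) (p : Int × String) :
    PySem.Dict Int Int × PySem.Dict Int Int × PySem.Dict Int Int :=
  if sd.contains p.2 then (st.1.insert p.1 (sd.getD p.2 0), st.2.1, st.2.2)
  else if nw.contains p.2 then (st.1, st.2.1.insert p.1 (-1), st.2.2)
  else if dd.contains p.2 then (st.1, st.2.1, st.2.2.insert p.1 (dd.getD p.2 0))
  else st

def pvBStep (sd dd : PySem.Dict String Int) (nw : List String)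
    (st : Int × Int × Bool × Int) (word : String) : Int × Int × Bool × Int :=
  if sd.contains word then
    let W' := if st.2.2.1 then st.1 * st.2.1 else st.1
    (W', 1, true, st.2.2.2 + W' * sd.getD word 0)
  else if nw.contains word then (st.1, st.2.1 * (-1), st.2.2.1, st.2.2.2)
  else if dd.contains word then (st.1, st.2.1 * dd.getD word 0, st.2.2.1, st.2.2.2)
  else st

-- A-level reference: weighted sum over the sentiment pairs, weight updated by the gap modifiers
def pvModFold (N D : PySem.Dict Int Int) (a b X : Int) : Int :=
  (PySem.List.pyRange a b 1).foldl (pvModStep N D) X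

def pvSpecA (N D : PySem.Dict Int Int) : List (Int × Int) → Int → Int
  | [], _ => 0
  | [(_, v)], W => W * v
  | (i, v) :: (i', v') :: rest, W =>
    W * v + pvSpecA N D ((i', v') :: rest) (pvModFold N D (i + 1) i' W)

def pvSpecAt (N D : PySem.Dict Int Int) (P : List (Int × Int)) (a X : Int) : Int :=
  match P with
  | [] => 0
  | (i0, _) :: _ => pvSpecA N D P (pvModFold N D a i0 X)

-- B-level reference
def pvGo2 : List PvC → Int → Int → Int
  | [], _, _ => 0
  | .sent v :: t, W, p => (W * p) * v + pvGo2 t (W * p) 1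
  | .neg :: t, W, p => pvGo2 t W (p * (-1))
  | .deg d :: t, W, p => pvGo2 t W (p * d)
  | .other :: t, W, p => pvGo2 t W p

def pvGo1 : List PvC → Int → Int
  | [], _ => 0
  | .sent v :: t, W => W * v + pvGo2 t W 1
  | .neg :: t, W => pvGo1 t W
  | .deg _ :: t, W => pvGo1 t W
  | .other :: t, W => pvGo1 t W

-- ---- facts about pvPairsC ----

theorem pvPairsC_bounds (f : PvC → Option Int) :
    ∀ (cs : List PvC) (s : Int) (p : Int × Int), p ∈ pvPairsC f cs s →
      s ≤ p.1 ∧ p.1 < s + cs.length := by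
  intro cs
  induction cs with
  | nil => intro s p hp; simp [pvPairsC] at hp
  | cons c t ih =>
    intro s p hp
    simp only [pvPairsC] at hp
    cases hfc : f c with
    | some v =>
      rw [hfc] at hp
      rcases List.mem_cons.1 hp with h | h
      · subst h
        refine ⟨le_refl _, ?_⟩
        show s < s + ((c :: t).length : Int)
        simp only [List.length_cons]
        push_cast
        omega
      · have h2 := ih (s + 1) p h
        simp only [List.length_cons]
        push_cast at h2 ⊢
        omega
    | none =>
      rw [hfc] at hp
      have h2 := ih (s + 1) p hp
      simp only [List.length_cons]
      push_cast at h2 ⊢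
      omega

theorem pvPairsC_pairwise (f : PvC → Option Int) :
    ∀ (cs : List PvC) (s : Int), (pvPairsC f cs s).Pairwise (fun p q => p.1 < q.1) := by
  intro cs
  induction cs with
  | nil => intro s; simp [pvPairsC]
  | cons c t ih =>
    intro s
    simp only [pvPairsC]
    cases hfc : f c with
    | some v =>
      refine List.Pairwise.cons ?_ (ih (s + 1))
      intro q hq
      have h2 := pvPairsC_bounds f t (s + 1) q hq
      show s < q.1
      omega
    | none => exact ih (s + 1)

theorem pvPairsC_mem (f : PvC → Option Int) :
    ∀ (cs : List PvC) (s : Int) (j v : Int),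
      (j, v) ∈ pvPairsC f cs s ↔
        ∃ (k : Nat) (h : k < cs.length), j = s + (k : Int) ∧ f cs[k] = some v := by
  intro cs
  induction cs with
  | nil => intro s j v; simp [pvPairsC]
  | cons c t ih =>
    intro s j v
    simp only [pvPairsC]
    constructor
    · intro hp
      cases hfc : f c with
      | some w =>
        rw [hfc] at hp
        rcases List.mem_cons.1 hp with h | h
        · refine ⟨0, by simp, by simpa using congrArg Prod.fst h, ?_⟩
          have hv : v = w := congrArg Prod.snd h
          simp [hv, hfc]
        · rcases (ih (s + 1) j v).1 h with ⟨k, hk, hj, hfk⟩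
          refine ⟨k + 1, by simpa using hk, by push_cast; omega, by simpa using hfk⟩
      | none =>
        rw [hfc] at hp
        rcases (ih (s + 1) j v).1 hp with ⟨k, hk, hj, hfk⟩
        refine ⟨k + 1, by simpa using hk, by push_cast; omega, by simpa using hfk⟩
    · rintro ⟨k, hk, hj, hfk⟩
      cases k with
      | zero =>
        simp at hfk hj
        rw [hfk]
        subst hj
        simp
      | succ k' =>
        have hmem : (j, v) ∈ pvPairsC f t (s + 1) := by
          refine (ih (s + 1) j v).2
            ⟨k', by simpa using hk, by push_cast at hj ⊢; omega, by simpa using hfk⟩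
        cases hfc : f c with
        | some w => exact List.mem_cons_of_mem _ hmem
        | none => exact hmem

theorem pvPairsC_mem_fst (f : PvC → Option Int) (cs : List PvC) (s j : Int) :
    j ∈ (pvPairsC f cs s).map (·.1) ↔
      ∃ (k : Nat) (h : k < cs.length), j = s + (k : Int) ∧ (f cs[k]).isSome := by
  simp only [List.mem_map]
  constructor
  · rintro ⟨⟨j', v⟩, hp, rfl⟩
    rcases (pvPairsC_mem f cs s j' v).1 hp with ⟨k, hk, hj, hfk⟩
    exact ⟨k, hk, hj, by simp [hfk]⟩
  · rintro ⟨k, hk, hj, hfk⟩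
    rcases Option.isSome_iff_exists.1 hfk with ⟨v, hv⟩
    exact ⟨(j, v), (pvPairsC_mem f cs s j v).2 ⟨k, hk, hj, hv⟩, rfl⟩

theorem pvPairsC_nodup_fst (f : PvC → Option Int) (cs : List PvC) (s : Int) :
    ((pvPairsC f cs s).map (·.1)).Nodup := by
  have h2 : ((pvPairsC f cs s).map (·.1)).Pairwise (· < ·) :=
    List.Pairwise.map (f := fun p : Int × Int => p.1)
      (fun a b (hab : a.1 < b.1) => hab) (pvPairsC_pairwise f cs s)
  exact List.Pairwise.imp (fun hab => ne_of_lt hab) h2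

-- ---- dict-level facts ----

theorem pvKeys_mk (l : List (Int × Int)) :
    (PySem.Dict.mk l : PySem.Dict Int Int).keys = l.map (·.1) := by
  simp [PySem.Dict.keys]

theorem pvContains_iff (f : PvC → Option Int) (cs : List PvC) (j : Int) :
    (PySem.Dict.mk (pvPairsC f cs 0) : PySem.Dict Int Int).contains j = true ↔
      ∃ (k : Nat) (h : k < cs.length), j = (k : Int) ∧ (f cs[k]).isSome := by
  rw [PySem.Dict.contains_iff_mem_keys, pvKeys_mk, pvPairsC_mem_fst]
  simp

theorem pvGetD_eq (f : PvC → Option Int) (cs : List PvC) (j v : Int)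
    (hm : (j, v) ∈ pvPairsC f cs 0) :
    (PySem.Dict.mk (pvPairsC f cs 0) : PySem.Dict Int Int).getD j 0 = v := by
  apply PySem.Dict.getD_of_mem_items (PySem.Dict.mk (pvPairsC f cs 0)) hm
  rw [pvKeys_mk]
  exact pvPairsC_nodup_fst f cs 0

theorem pvContains_pos (f : PvC → Option Int) (cs : List PvC) (a : Nat)
    (h : a < cs.length) (hs : (f cs[a]).isSome) :
    (PySem.Dict.mk (pvPairsC f cs 0) : PySem.Dict Int Int).contains (a : Int) = true :=
  (pvContains_iff f cs (a : Int)).2 ⟨a, h, rfl, hs⟩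

theorem pvContains_none (f : PvC → Option Int) (cs : List PvC) (a : Nat)
    (h : a < cs.length) (hs : f cs[a] = none) :
    (PySem.Dict.mk (pvPairsC f cs 0) : PySem.Dict Int Int).contains (a : Int) = false := by
  rw [Bool.eq_false_iff]
  intro hcon
  rcases (pvContains_iff f cs (a : Int)).1 hcon with ⟨k, hk, hjk, hsk⟩
  have hka : k = a := by omega
  subst hka
  rw [hs] at hsk
  cases hsk

-- the inner-loop step, read off the word classes
theorem pvModStep_neg (cs : List PvC) (X : Int) (a : Nat) (h : a < cs.length)
    (hc : cs[a] = .neg) :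
    pvModStep (pvN cs) (pvD cs) X (a : Int) = X * (-1) := by
  have hN : (pvN cs).contains (a : Int) = true :=
    pvContains_pos pvF_N cs a h (by simp [hc, pvF_N])
  simp [pvModStep, hN]

theorem pvModStep_deg (cs : List PvC) (X : Int) (a : Nat) (h : a < cs.length) (d : Int)
    (hc : cs[a] = .deg d) :
    pvModStep (pvN cs) (pvD cs) X (a : Int) = X * d := by
  have hN : (pvN cs).contains (a : Int) = false :=
    pvContains_none pvF_N cs a h (by simp [hc, pvF_N])
  have hD : (pvD cs).contains (a : Int) = true :=
    pvContains_pos pvF_D cs a h (by simp [hc, pvF_D])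
  have hDv : (pvD cs).getD (a : Int) 0 = d :=
    pvGetD_eq pvF_D cs (a : Int) d
      ((pvPairsC_mem pvF_D cs 0 (a : Int) d).2 ⟨a, h, by omega, by simp [hc, pvF_D]⟩)
  simp [pvModStep, hN, hD, hDv]

theorem pvModStep_skip (cs : List PvC) (X : Int) (a : Nat) (h : a < cs.length)
    (hcN : pvF_N cs[a] = none) (hcD : pvF_D cs[a] = none) :
    pvModStep (pvN cs) (pvD cs) X (a : Int) = X := by
  have hN : (pvN cs).contains (a : Int) = false := pvContains_none pvF_N cs a h hcN
  have hD : (pvD cs).contains (a : Int) = false := pvContains_none pvF_D cs a h hcD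
  simp [pvModStep, hN, hD]

-- a stretch of the outer loop that contains no sentiment position does nothing
theorem pvSkip (cs : List PvC) (lo hi : Int) (st : Int × Int)
    (h : ∀ j : Int, lo ≤ j → j < hi → (pvS cs).contains j = false) :
    (PySem.List.pyRange lo hi 1).foldl (pvOuterStep (pvS cs) (pvN cs) (pvD cs)) st = st := by
  refine Eq.trans
    (PySem.List.foldl_congr_mem (PySem.List.pyRange lo hi 1)
      (pvOuterStep (pvS cs) (pvN cs) (pvD cs)) (fun acc _ => acc) st ?_)
    (PySem.List.foldl_ignore (PySem.List.pyRange lo hi 1) st)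
  intro acc x hx
  have hb := (PySem.List.mem_pyRange_one).1 hx
  simp [pvOuterStep, h x hb.1 hb.2]

-- ---- MAIN: A's outer loop computes pvSpecA over the remaining sentiment pairs ----
theorem pvMain (cs : List PvC) :
    ∀ (suf pre : List (Int × Int)) (a W score : Int),
      pvPairsC pvF_S cs 0 = pre ++ suf →
      (∀ p ∈ pre, p.1 < a) → (∀ p ∈ suf, a ≤ p.1) →
      ((PySem.List.pyRange a (cs.length : Int) 1).foldl
          (pvOuterStep (pvS cs) (pvN cs) (pvD cs)) (W, score)).2
        = score + pvSpecA (pvN cs) (pvD cs) suf W := by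
  intro suf
  induction suf with
  | nil =>
    intro pre a W score hSP hpre _hsuf
    have hnone : ∀ j : Int, a ≤ j → j < (cs.length : Int) → (pvS cs).contains j = false := by
      intro j hj1 _hj2
      rw [Bool.eq_false_iff]
      intro hcon
      rcases (pvContains_iff pvF_S cs j).1 hcon with ⟨k, hk, hjk, hs⟩
      have hmem : j ∈ (pvPairsC pvF_S cs 0).map (·.1) :=
        (pvPairsC_mem_fst pvF_S cs 0 j).2 ⟨k, hk, by omega, hs⟩
      rw [hSP] at hmem
      simp only [List.append_nil] at hmem
      rcases List.mem_map.1 hmem with ⟨p, hp, rfl⟩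
      exact absurd (hpre p hp) (by omega)
    rw [pvSkip cs a (cs.length : Int) (W, score) hnone]
    simp [pvSpecA]
  | cons hd rest ih =>
    intro pre a W score hSP hpre hsuf
    obtain ⟨i, v⟩ := hd
    have hmemSP : (i, v) ∈ pvPairsC pvF_S cs 0 := by rw [hSP]; simp
    have hbounds := pvPairsC_bounds pvF_S cs 0 (i, v) hmemSP
    have hi0 : 0 ≤ i := by simpa using hbounds.1
    have hin : i < (cs.length : Int) := by simpa using hbounds.2
    have hai : a ≤ i := by simpa using hsuf (i, v) (by simp)
    have hpw := pvPairsC_pairwise pvF_S cs 0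
    rw [hSP] at hpw
    have hrest_gt : ∀ q ∈ rest, i < q.1 := by
      have h2 := (List.pairwise_append.1 hpw).2.1
      intro q hq
      exact (List.pairwise_cons.1 h2).1 q hq
    have hkeys : (pvS cs).keys = pre.map (·.1) ++ i :: rest.map (·.1) := by
      show (pvPairsC pvF_S cs 0).map (·.1) = _
      rw [hSP]; simp
    have hnos : ∀ j : Int, a ≤ j → j < i → (pvS cs).contains j = false := by
      intro j hj1 hj2
      rw [Bool.eq_false_iff]
      intro hcon
      have hmemj : j ∈ (pvS cs).keys := by
        rcases (pvContains_iff pvF_S cs j).1 hcon with ⟨k, hk, hjk, hs⟩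
        show j ∈ (pvPairsC pvF_S cs 0).map (·.1)
        exact (pvPairsC_mem_fst pvF_S cs 0 j).2 ⟨k, hk, by omega, hs⟩
      rw [hkeys] at hmemj
      rcases List.mem_append.1 hmemj with hmj | hmj
      · rcases List.mem_map.1 hmj with ⟨p, hp, rfl⟩
        exact absurd (hpre p hp) (by omega)
      · rcases List.mem_cons.1 hmj with heq | hmj
        · omega
        · rcases List.mem_map.1 hmj with ⟨p, hp, rfl⟩
          exact absurd (hrest_gt p hp) (by omega)
    rw [PySem.List.pyRange_one_append a i (cs.length : Int) hai (le_of_lt hin),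
        List.foldl_append, pvSkip cs a i (W, score) hnos,
        PySem.List.pyRange_one_cons hin, List.foldl_cons]
    have hSc : (pvS cs).contains i = true := by
      rcases (pvPairsC_mem pvF_S cs 0 i v).1 hmemSP with ⟨k, hk, hjk, hs⟩
      exact (pvContains_iff pvF_S cs i).2 ⟨k, hk, by omega, by simp [hs]⟩
    have hgetD : (pvS cs).getD i 0 = v := pvGetD_eq pvF_S cs i v hmemSP
    have hidx : PySem.List.index? (pvS cs).keys i = some (pre.map (·.1)).length := by
      rw [PySem.List.index?_eq_some_iff]
      refine ⟨pre.map (·.1), rest.map (·.1), hkeys, rfl, ?_⟩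
      intro hmem
      rcases List.mem_map.1 hmem with ⟨p, hp, hpp⟩
      have := hpre p hp
      omega
    have hkeylen : (pvS cs).keys.length = pre.length + 1 + rest.length := by
      rw [hkeys]
      simp only [List.length_append, List.length_map, List.length_cons]
      omega
    cases rest with
    | nil =>
      have hcond : ¬ ((pre.map (·.1)).length + 1 < (pvS cs).keys.length) := by
        rw [hkeylen]
        simp only [List.length_map, List.length_nil]
        omega
      have hstep : pvOuterStep (pvS cs) (pvN cs) (pvD cs) (W, score) i
          = (W, score + W * v) := by
        unfold pvOuterStep
        rw [if_pos hSc, hidx]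
        simp only [Option.getD_some]
        rw [if_neg hcond, hgetD]
      rw [hstep]
      rw [ih (pre ++ [(i, v)]) (i + 1) W (score + W * v)
          (by rw [hSP]; simp) ?_ (by intro p hp; cases hp)]
      · simp [pvSpecA]
      · intro p hp
        rcases List.mem_append.1 hp with hp | hp
        · have := hpre p hp; omega
        · rcases List.mem_cons.1 hp with heq | hp
          · subst heq; show i < i + 1; omega
          · cases hp
    | cons hd2 rest2 =>
      obtain ⟨i2, v2⟩ := hd2
      have hcond : (pre.map (·.1)).length + 1 < (pvS cs).keys.length := by
        rw [hkeylen]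
        simp only [List.length_map, List.length_cons]
        omega
      have hgi : PySem.List.pyGetD (pvS cs).keys (((pre.map (·.1)).length + 1 : Nat) : Int) 0
          = i2 := by
        rw [PySem.List.pyGetD_natCast (pvS cs).keys ((pre.map (·.1)).length + 1) 0]
        rw [List.getD_eq_getElem (pvS cs).keys 0 hcond]
        have hkeys2 : (pvS cs).keys = (pre.map (·.1) ++ [i]) ++ i2 :: rest2.map (·.1) := by
          rw [hkeys]; simp
        simp only [hkeys2]
        rw [List.getElem_append_right (by simp)]
        simp
      have hstep : pvOuterStep (pvS cs) (pvN cs) (pvD cs) (W, score) i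
          = (pvModFold (pvN cs) (pvD cs) (i + 1) i2 W, score + W * v) := by
        unfold pvOuterStep
        rw [if_pos hSc, hidx]
        simp only [Option.getD_some]
        rw [if_pos hcond, hgi, hgetD]
        rfl
      rw [hstep]
      rw [ih (pre ++ [(i, v)]) (i + 1) (pvModFold (pvN cs) (pvD cs) (i + 1) i2 W)
          (score + W * v) (by rw [hSP]; simp) ?_ ?_]
      · simp only [pvSpecA]
        omega
      · intro p hp
        rcases List.mem_append.1 hp with hp | hp
        · have := hpre p hp; omega
        · rcases List.mem_cons.1 hp with heq | hp
          · subst heq; show i < i + 1; omega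
          · cases hp
      · intro p hp
        have := hrest_gt p hp
        omega

-- ---- the dict-building loop of A ----
theorem pvBuild (sd dd : PySem.Dict String Int) (nw : List String) :
    ∀ (ws : List String) (s : Int) (d1 d2 d3 : PySem.Dict Int Int),
      (∀ k ∈ d1.keys, k < s) → (∀ k ∈ d2.keys, k < s) → (∀ k ∈ d3.keys, k < s) →
      (PySem.List.enumerate ws s).foldl (pvBuildStep sd dd nw) (d1, d2, d3)
        = (⟨d1.items ++ pvPairsC pvF_S (ws.map (pvCls sd dd nw)) s⟩,
           ⟨d2.items ++ pvPairsC pvF_N (ws.map (pvCls sd dd nw)) s⟩,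
           ⟨d3.items ++ pvPairsC pvF_D (ws.map (pvCls sd dd nw)) s⟩) := by
  intro ws
  induction ws with
  | nil =>
    intro s d1 d2 d3 _ _ _
    simp [PySem.List.enumerate, pvPairsC]
  | cons w t ih =>
    intro s d1 d2 d3 h1 h2 h3
    rw [PySem.List.enumerate_cons, List.foldl_cons]
    have hfresh : ∀ (d : PySem.Dict Int Int), (∀ k ∈ d.keys, k < s) → ∀ (v : Int),
        d.insert s v = ⟨d.items ++ [(s, v)]⟩ := by
      intro d hd v
      apply PySem.Dict.ext
      have hnc : d.contains s = false := by
        rw [Bool.eq_false_iff]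
        intro hcon
        have hm := (PySem.Dict.contains_iff_mem_keys d s).1 hcon
        have := hd s hm
        omega
      rw [PySem.Dict.items_insert_of_not_contains d v hnc]
    have hkeysnew : ∀ (d : PySem.Dict Int Int), (∀ k ∈ d.keys, k < s) → ∀ (v : Int),
        ∀ k ∈ (⟨d.items ++ [(s, v)]⟩ : PySem.Dict Int Int).keys, k < s + 1 := by
      intro d hd v k hk
      have hk2 : k ∈ d.items.map (·.1) ++ [s] := by
        simpa [PySem.Dict.keys] using hk
      rcases List.mem_append.1 hk2 with h | h
      · have := hd k (by simpa [PySem.Dict.keys] using h)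
        omega
      · simp at h
        omega
    by_cases hsd : sd.contains w = true
    · rw [show pvBuildStep sd dd nw (d1, d2, d3) (s, w)
          = (d1.insert s (sd.getD w 0), d2, d3) from by simp [pvBuildStep, hsd]]
      rw [hfresh d1 h1 (sd.getD w 0)]
      rw [ih (s + 1) _ d2 d3 (hkeysnew d1 h1 _) (fun k hk => by have := h2 k hk; omega)
          (fun k hk => by have := h3 k hk; omega)]
      simp only [List.map_cons]
      rw [show pvCls sd dd nw w = .sent (sd.getD w 0) from by simp [pvCls, hsd]]
      simp [pvPairsC, pvF_S, pvF_N, pvF_D, List.append_assoc]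
    · by_cases hnw : nw.contains w = true
      · have hnw' : w ∈ nw := by simpa using hnw
        rw [show pvBuildStep sd dd nw (d1, d2, d3) (s, w)
            = (d1, d2.insert s (-1), d3) from by simp [pvBuildStep, hsd, hnw']]
        rw [hfresh d2 h2 (-1)]
        rw [ih (s + 1) d1 _ d3 (fun k hk => by have := h1 k hk; omega) (hkeysnew d2 h2 _)
            (fun k hk => by have := h3 k hk; omega)]
        simp only [List.map_cons]
        rw [show pvCls sd dd nw w = .neg from by simp [pvCls, hsd, hnw']]
        simp [pvPairsC, pvF_S, pvF_N, pvF_D, List.append_assoc]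
      · have hnw' : ¬ (w ∈ nw) := by simpa using hnw
        by_cases hdd : dd.contains w = true
        · rw [show pvBuildStep sd dd nw (d1, d2, d3) (s, w)
              = (d1, d2, d3.insert s (dd.getD w 0)) from by simp [pvBuildStep, hsd, hnw', hdd]]
          rw [hfresh d3 h3 (dd.getD w 0)]
          rw [ih (s + 1) d1 d2 _ (fun k hk => by have := h1 k hk; omega)
              (fun k hk => by have := h2 k hk; omega) (hkeysnew d3 h3 _)]
          simp only [List.map_cons]
          rw [show pvCls sd dd nw w = .deg (dd.getD w 0) from by simp [pvCls, hsd, hnw', hdd]]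
          simp [pvPairsC, pvF_S, pvF_N, pvF_D, List.append_assoc]
        · rw [show pvBuildStep sd dd nw (d1, d2, d3) (s, w)
              = (d1, d2, d3) from by simp [pvBuildStep, hsd, hnw', hdd]]
          rw [ih (s + 1) d1 d2 d3 (fun k hk => by have := h1 k hk; omega)
              (fun k hk => by have := h2 k hk; omega) (fun k hk => by have := h3 k hk; omega)]
          simp only [List.map_cons]
          rw [show pvCls sd dd nw w = .other from by simp [pvCls, hsd, hnw', hdd]]
          simp [pvPairsC, pvF_S, pvF_N, pvF_D]

-- ---- relating pvSpecA to the B-level references ----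

theorem pvSpecAt_shift (cs : List PvC) (P : List (Int × Int)) (a : Nat)
    (X : Int) (hP : ∀ p ∈ P, (a : Int) + 1 ≤ p.1) :
    pvSpecAt (pvN cs) (pvD cs) P (a : Int) X
      = pvSpecAt (pvN cs) (pvD cs) P ((a : Int) + 1)
          (pvModStep (pvN cs) (pvD cs) X (a : Int)) := by
  cases P with
  | nil => rfl
  | cons p0 t =>
    obtain ⟨i0, v0⟩ := p0
    have hlt : (a : Int) < i0 := by
      have := hP (i0, v0) (by simp)
      omega
    simp only [pvSpecAt]
    congr 1
    unfold pvModFold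
    rw [PySem.List.pyRange_one_cons hlt, List.foldl_cons]

theorem pvGO2 (cs : List PvC) :
    ∀ (t : List PvC) (a : Nat) (W p : Int), cs.drop a = t →
      pvGo2 t W p
        = pvSpecAt (pvN cs) (pvD cs) (pvPairsC pvF_S t (a : Int)) (a : Int) (W * p) := by
  intro t
  induction t with
  | nil => intro a W p _; simp [pvGo2, pvPairsC, pvSpecAt]
  | cons c t' ih =>
    intro a W p hd
    have ha : a < cs.length := by
      by_contra hcon
      rw [List.drop_eq_nil_of_le (by omega)] at hd
      cases hd
    have hget : cs[a] = c := by
      have h0 : (cs.drop a)[0]'(by rw [hd]; simp) = c := by simp [hd]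
      rw [List.getElem_drop] at h0
      simpa using h0
    have hd' : cs.drop (a + 1) = t' := by
      have htl : (cs.drop a).tail = t' := by rw [hd, List.tail_cons]
      rw [← htl, List.tail_drop]
    have hbnd : ∀ q ∈ pvPairsC pvF_S t' ((a : Int) + 1), (a : Int) + 1 ≤ q.1 :=
      fun q hq => (pvPairsC_bounds pvF_S t' ((a : Int) + 1) q hq).1
    cases c with
    | sent v =>
      simp only [pvGo2]
      rw [ih (a + 1) (W * p) 1 hd']
      push_cast
      rw [show pvPairsC pvF_S (.sent v :: t') (a : Int)
          = ((a : Int), v) :: pvPairsC pvF_S t' ((a : Int) + 1) from by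
        simp [pvPairsC, pvF_S]]
      have hmf : pvModFold (pvN cs) (pvD cs) (a : Int) (a : Int) (W * p) = W * p := by
        unfold pvModFold
        rw [PySem.List.pyRange_one_eq_nil (by omega)]
        rfl
      cases hP' : pvPairsC pvF_S t' ((a : Int) + 1) with
      | nil => simp [pvSpecAt, pvSpecA, hmf]
      | cons q0 t2 =>
        obtain ⟨i2, v2⟩ := q0
        simp only [pvSpecAt, pvSpecA, hmf, mul_one]
    | neg =>
      simp only [pvGo2]
      rw [ih (a + 1) W (p * (-1)) hd']
      push_cast
      rw [show pvPairsC pvF_S (.neg :: t') (a : Int)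
          = pvPairsC pvF_S t' ((a : Int) + 1) from by simp [pvPairsC, pvF_S]]
      rw [pvSpecAt_shift cs _ a (W * p) hbnd]
      rw [pvModStep_neg cs (W * p) a ha hget]
      congr 1
      ring
    | deg d =>
      simp only [pvGo2]
      rw [ih (a + 1) W (p * d) hd']
      push_cast
      rw [show pvPairsC pvF_S (.deg d :: t') (a : Int)
          = pvPairsC pvF_S t' ((a : Int) + 1) from by simp [pvPairsC, pvF_S]]
      rw [pvSpecAt_shift cs _ a (W * p) hbnd]
      rw [pvModStep_deg cs (W * p) a ha d hget]
      congr 1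
      ring
    | other =>
      simp only [pvGo2]
      rw [ih (a + 1) W p hd']
      push_cast
      rw [show pvPairsC pvF_S (.other :: t') (a : Int)
          = pvPairsC pvF_S t' ((a : Int) + 1) from by simp [pvPairsC, pvF_S]]
      rw [pvSpecAt_shift cs _ a (W * p) hbnd]
      rw [pvModStep_skip cs (W * p) a ha (by simp [hget, pvF_N]) (by simp [hget, pvF_D])]

theorem pvGO1 (cs : List PvC) :
    ∀ (t : List PvC) (a : Nat) (W : Int), cs.drop a = t →
      pvGo1 t W = pvSpecA (pvN cs) (pvD cs) (pvPairsC pvF_S t (a : Int)) W := by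
  intro t
  induction t with
  | nil => intro a W _; simp [pvGo1, pvPairsC, pvSpecA]
  | cons c t' ih =>
    intro a W hd
    have hd' : cs.drop (a + 1) = t' := by
      have htl : (cs.drop a).tail = t' := by rw [hd, List.tail_cons]
      rw [← htl, List.tail_drop]
    cases c with
    | sent v =>
      simp only [pvGo1]
      rw [pvGO2 cs t' (a + 1) W 1 hd']
      push_cast
      rw [show pvPairsC pvF_S (.sent v :: t') (a : Int)
          = ((a : Int), v) :: pvPairsC pvF_S t' ((a : Int) + 1) from by
        simp [pvPairsC, pvF_S]]
      cases hP' : pvPairsC pvF_S t' ((a : Int) + 1) with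
      | nil => simp [pvSpecAt, pvSpecA]
      | cons q0 t2 =>
        obtain ⟨i2, v2⟩ := q0
        simp only [pvSpecAt, pvSpecA, mul_one]
    | neg =>
      simp only [pvGo1]
      rw [ih (a + 1) W hd']
      push_cast
      rw [show pvPairsC pvF_S (.neg :: t') (a : Int)
          = pvPairsC pvF_S t' ((a : Int) + 1) from by simp [pvPairsC, pvF_S]]
    | deg d =>
      simp only [pvGo1]
      rw [ih (a + 1) W hd']
      push_cast
      rw [show pvPairsC pvF_S (.deg d :: t') (a : Int)
          = pvPairsC pvF_S t' ((a : Int) + 1) from by simp [pvPairsC, pvF_S]]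
    | other =>
      simp only [pvGo1]
      rw [ih (a + 1) W hd']
      push_cast
      rw [show pvPairsC pvF_S (.other :: t') (a : Int)
          = pvPairsC pvF_S t' ((a : Int) + 1) from by simp [pvPairsC, pvF_S]]

-- ---- B's single pass computes pvGo1 ----

theorem pvB2lem (sd dd : PySem.Dict String Int) (nw : List String) :
    ∀ (ws : List String) (W p score : Int),
      (ws.foldl (pvBStep sd dd nw) (W, p, true, score)).2.2.2
        = score + pvGo2 (ws.map (pvCls sd dd nw)) W p := by
  intro ws
  induction ws with
  | nil => intro W p score; simp [pvGo2]
  | cons w t ih =>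
    intro W p score
    rw [List.foldl_cons]
    simp only [List.map_cons]
    by_cases hsd : sd.contains w = true
    · rw [show pvBStep sd dd nw (W, p, true, score) w
          = (W * p, 1, true, score + (W * p) * sd.getD w 0) from by simp [pvBStep, hsd]]
      rw [ih]
      rw [show pvCls sd dd nw w = .sent (sd.getD w 0) from by simp [pvCls, hsd]]
      simp only [pvGo2]
      rw [add_assoc]
    · by_cases hnw : nw.contains w = true
      · have hnw' : w ∈ nw := by simpa using hnw
        rw [show pvBStep sd dd nw (W, p, true, score) w
            = (W, p * (-1), true, score) from by simp [pvBStep, hsd, hnw']]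
        rw [ih]
        rw [show pvCls sd dd nw w = .neg from by simp [pvCls, hsd, hnw']]
        simp only [pvGo2]
      · have hnw' : ¬ (w ∈ nw) := by simpa using hnw
        by_cases hdd : dd.contains w = true
        · rw [show pvBStep sd dd nw (W, p, true, score) w
              = (W, p * dd.getD w 0, true, score) from by simp [pvBStep, hsd, hnw', hdd]]
          rw [ih]
          rw [show pvCls sd dd nw w = .deg (dd.getD w 0) from by simp [pvCls, hsd, hnw', hdd]]
          simp only [pvGo2]
        · rw [show pvBStep sd dd nw (W, p, true, score) w
              = (W, p, true, score) from by simp [pvBStep, hsd, hnw', hdd]]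
          rw [ih]
          rw [show pvCls sd dd nw w = .other from by simp [pvCls, hsd, hnw', hdd]]
          simp only [pvGo2]

theorem pvB1lem (sd dd : PySem.Dict String Int) (nw : List String) :
    ∀ (ws : List String) (W p score : Int),
      (ws.foldl (pvBStep sd dd nw) (W, p, false, score)).2.2.2
        = score + pvGo1 (ws.map (pvCls sd dd nw)) W := by
  intro ws
  induction ws with
  | nil => intro W p score; simp [pvGo1]
  | cons w t ih =>
    intro W p score
    rw [List.foldl_cons]
    simp only [List.map_cons]
    by_cases hsd : sd.contains w = true
    · rw [show pvBStep sd dd nw (W, p, false, score) w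
          = (W, 1, true, score + W * sd.getD w 0) from by simp [pvBStep, hsd]]
      rw [pvB2lem sd dd nw t W 1 (score + W * sd.getD w 0)]
      rw [show pvCls sd dd nw w = .sent (sd.getD w 0) from by simp [pvCls, hsd]]
      simp only [pvGo1]
      rw [add_assoc]
    · by_cases hnw : nw.contains w = true
      · have hnw' : w ∈ nw := by simpa using hnw
        rw [show pvBStep sd dd nw (W, p, false, score) w
            = (W, p * (-1), false, score) from by simp [pvBStep, hsd, hnw']]
        rw [ih]
        rw [show pvCls sd dd nw w = .neg from by simp [pvCls, hsd, hnw']]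
        simp only [pvGo1]
      · have hnw' : ¬ (w ∈ nw) := by simpa using hnw
        by_cases hdd : dd.contains w = true
        · rw [show pvBStep sd dd nw (W, p, false, score) w
              = (W, p * dd.getD w 0, false, score) from by simp [pvBStep, hsd, hnw', hdd]]
          rw [ih]
          rw [show pvCls sd dd nw w = .deg (dd.getD w 0) from by simp [pvCls, hsd, hnw', hdd]]
          simp only [pvGo1]
        · rw [show pvBStep sd dd nw (W, p, false, score) w
              = (W, p, false, score) from by simp [pvBStep, hsd, hnw', hdd]]
          rw [ih]
          rw [show pvCls sd dd nw w = .other from by simp [pvCls, hsd, hnw', hdd]]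
          simp only [pvGo1]

-- ===== VERDICT (by name: the statement is the Claim_ definition above) =====
theorem classify_and_score_words_spec : Claim_equal_classify_and_score_words := by
  intro wl sdl nw ddl _dom
  unfold Spec_classify_and_score_words
  have hemp : ∀ k ∈ (PySem.Dict.empty : PySem.Dict Int Int).keys, k < (0 : Int) := by
    intro k hk
    simp [PySem.Dict.keys,
      show (PySem.Dict.empty : PySem.Dict Int Int).items = ([] : List (Int × Int)) from rfl] at hk
  have hbuild := pvBuild (PySem.Dict.ofList sdl) (PySem.Dict.ofList ddl) nw wl 0
    PySem.Dict.empty PySem.Dict.empty PySem.Dict.empty hemp hemp hemp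
  have hA : classify_and_score_words wl sdl nw ddl
      = calculate_weighted_score
          (pvS (wl.map (pvCls (PySem.Dict.ofList sdl) (PySem.Dict.ofList ddl) nw)))
          (pvN (wl.map (pvCls (PySem.Dict.ofList sdl) (PySem.Dict.ofList ddl) nw)))
          (pvD (wl.map (pvCls (PySem.Dict.ofList sdl) (PySem.Dict.ofList ddl) nw))) wl := by
    show calculate_weighted_score
        ((PySem.List.enumerate wl 0).foldl
          (pvBuildStep (PySem.Dict.ofList sdl) (PySem.Dict.ofList ddl) nw)
          (PySem.Dict.empty, PySem.Dict.empty, PySem.Dict.empty)).1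
        ((PySem.List.enumerate wl 0).foldl
          (pvBuildStep (PySem.Dict.ofList sdl) (PySem.Dict.ofList ddl) nw)
          (PySem.Dict.empty, PySem.Dict.empty, PySem.Dict.empty)).2.1
        ((PySem.List.enumerate wl 0).foldl
          (pvBuildStep (PySem.Dict.ofList sdl) (PySem.Dict.ofList ddl) nw)
          (PySem.Dict.empty, PySem.Dict.empty, PySem.Dict.empty)).2.2 wl = _
    rw [hbuild]
    simp only [show (PySem.Dict.empty : PySem.Dict Int Int).items
        = ([] : List (Int × Int)) from rfl, List.nil_append]
    rfl
  rw [hA]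
  rw [show classify_and_score_words_alt wl sdl nw ddl
      = (wl.foldl (pvBStep (PySem.Dict.ofList sdl) (PySem.Dict.ofList ddl) nw)
          (1, 1, false, 0)).2.2.2 from rfl]
  rw [show calculate_weighted_score
      (pvS (wl.map (pvCls (PySem.Dict.ofList sdl) (PySem.Dict.ofList ddl) nw)))
      (pvN (wl.map (pvCls (PySem.Dict.ofList sdl) (PySem.Dict.ofList ddl) nw)))
      (pvD (wl.map (pvCls (PySem.Dict.ofList sdl) (PySem.Dict.ofList ddl) nw))) wl
      = ((PySem.List.pyRange 0 (PySem.List.len wl) 1).foldl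
          (pvOuterStep
            (pvS (wl.map (pvCls (PySem.Dict.ofList sdl) (PySem.Dict.ofList ddl) nw)))
            (pvN (wl.map (pvCls (PySem.Dict.ofList sdl) (PySem.Dict.ofList ddl) nw)))
            (pvD (wl.map (pvCls (PySem.Dict.ofList sdl) (PySem.Dict.ofList ddl) nw)))) (1, 0)).2
    from rfl]
  rw [show PySem.List.len wl
      = ((wl.map (pvCls (PySem.Dict.ofList sdl) (PySem.Dict.ofList ddl) nw)).length : Int)
    from by simp]
  rw [pvMain (wl.map (pvCls (PySem.Dict.ofList sdl) (PySem.Dict.ofList ddl) nw))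
      (pvPairsC pvF_S (wl.map (pvCls (PySem.Dict.ofList sdl) (PySem.Dict.ofList ddl) nw)) 0)
      [] 0 1 0 (by simp) (by intro p hp; cases hp)
      (fun p hp => (pvPairsC_bounds pvF_S _ 0 p hp).1)]
  rw [pvB1lem (PySem.Dict.ofList sdl) (PySem.Dict.ofList ddl) nw wl 1 1 0]
  rw [pvGO1 (wl.map (pvCls (PySem.Dict.ofList sdl) (PySem.Dict.ofList ddl) nw))
      (wl.map (pvCls (PySem.Dict.ofList sdl) (PySem.Dict.ofList ddl) nw)) 0 1 (by simp)]
  norm_num
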